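-- pv_equiv track=rewrite | github.com/tfabiha/ml_prjs | project_1/features.py | get_pos_encoding
-- ===== SOURCE A (Python) =====
-- def get_pos_encoding(POS_tags):
--     # POS tags
--     tags = "NOS^ZLMVAR!DP&TXY#@~UE$,G"
--     tot_tags = []
--     for count, tweet in enumerate(POS_tags):
--         temp_counter = [0 for each in tags]
--         for t in tweet:
--             if tags.find(t) > -1:
--                 temp_counter[tags.find(t)] += 1
--         tot_tags.append(temp_counter)
--     return tot_tags
-- ===== SOURCE B (Python) =====
-- def get_pos_encoding(POS_tags):
--     # POS tags
--     tags = "NOS^ZLMVAR!DP&TXY#@~UE$,G"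
--     return [[list(tweet).count(t) for t in tags] for tweet in POS_tags]
-- ===== Notes on version B (the rewrite author's own statement) =====
-- stated objective: idiomatic
-- what changed: Instead of scanning each tweet character by character, locating the tag's slot with str.find and incrementing an indexed counter list in place, B loops over the fixed 25-tag alphabet and emits list(tweet).count(t) for each tag, building every row directly by comprehension.
import Mathlib
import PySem

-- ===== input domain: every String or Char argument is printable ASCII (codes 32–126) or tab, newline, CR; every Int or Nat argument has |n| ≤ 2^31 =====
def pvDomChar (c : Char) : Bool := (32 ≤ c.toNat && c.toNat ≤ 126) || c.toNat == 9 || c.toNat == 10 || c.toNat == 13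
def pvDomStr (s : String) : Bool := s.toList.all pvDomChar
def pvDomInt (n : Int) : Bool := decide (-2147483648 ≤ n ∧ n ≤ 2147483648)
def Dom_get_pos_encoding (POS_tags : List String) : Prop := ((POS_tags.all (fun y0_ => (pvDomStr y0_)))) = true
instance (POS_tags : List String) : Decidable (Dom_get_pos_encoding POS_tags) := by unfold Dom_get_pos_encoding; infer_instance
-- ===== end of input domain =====

-- B replaces A's per-character scan (locate the tag slot via str.find, increment an indexed counter
-- in place) by one count pass per tag over the fixed 25-tag alphabet; objective: idiomatic, same cost.

-- ===== PORT A =====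
-- the constant string 'tags' of the Python function
def pvTags : String := "NOS^ZLMVAR!DP&TXY#@~UE$,G"

-- body of A's inner loop: "if tags.find(t) > -1: temp_counter[tags.find(t)] += 1"
def pvStepA (counter : List Int) (t : Char) : List Int :=
  if PySem.Str.find pvTags (String.singleton t) > -1 then
    PySem.List.pySetD counter (PySem.Str.find pvTags (String.singleton t))
      (PySem.List.pyGetD counter (PySem.Str.find pvTags (String.singleton t)) 0 + 1)
  else counter

def get_pos_encoding (POS_tags : List String) : List (List Int) :=
  (PySem.List.enumerate POS_tags).foldl
    (fun tot_tags ct =>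
      tot_tags ++ [ct.2.toList.foldl pvStepA (pvTags.toList.map (fun _ => (0 : Int)))]) []

-- ===== PORT B =====
def get_pos_encoding_alt (POS_tags : List String) : List (List Int) :=
  POS_tags.map (fun tweet =>
    pvTags.toList.map (fun t => (PySem.List.count tweet.toList t : Int)))

-- ===== PRECONDITION & SPEC =====
def Spec_get_pos_encoding (POS_tags : List String) (out : List (List Int)) : Prop := out = get_pos_encoding_alt POS_tags
instance (POS_tags : List String) (out : List (List Int)) : Decidable (Spec_get_pos_encoding POS_tags out) := by unfold Spec_get_pos_encoding; infer_instance

-- ===== CLAIM (what is proved, stated in full; the proofs are below) =====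
def Claim_equal_get_pos_encoding : Prop := ∀ (POS_tags : List String), Dom_get_pos_encoding POS_tags → Spec_get_pos_encoding POS_tags (get_pos_encoding POS_tags)

-- ===== LEMMAS AND PROOFS =====

-- tags.find(t) for a single character t is the first index of t among the 25 tags, or -1
theorem pv_find_single (c : Char) :
    PySem.Str.find pvTags (String.singleton c) =
      if c ∈ pvTags.toList then (pvTags.toList.idxOf c : Int) else -1 := by
  by_cases h : c ∈ pvTags.toList
  · have h2 : c ∈ ['N', 'O', 'S', '^', 'Z', 'L', 'M', 'V', 'A', 'R', '!', 'D', 'P', '&', 'T', 'X', 'Y', '#', '@', '~', 'U', 'E', '$', ',', 'G'] := h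
    fin_cases h2 <;> decide
  · simp only [h, if_false]
    refine (PySem.Str.find_eq_neg_one_iff _ _).mpr (fun hinf => h ?_)
    have hmem : c ∈ (String.singleton c).toList := by simp [String.toList_singleton]
    exact hinf.subset hmem

theorem pv_set_idxOf {α : Type} [DecidableEq α] (l : List α) (hnd : l.Nodup) (c : α)
    (hc : c ∈ l) (f : α → Int) :
    (l.map f).set (l.idxOf c) (f c + 1) = l.map (fun t => if t = c then f t + 1 else f t) := by
  induction l with
  | nil => cases hc
  | cons a t ih =>
    by_cases hac : a = c
    · subst hac
      simp only [List.idxOf_cons_self, List.map_cons, List.set_cons_zero]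
      have hnt : a ∉ t := (List.nodup_cons.mp hnd).1
      congr 1
      exact List.map_congr_left (fun x hx => by
        have : x ≠ a := fun h => hnt (h ▸ hx)
        simp [this])
    · have hct : c ∈ t := (List.mem_cons.mp hc).resolve_left (fun h => hac h.symm)
      simp only [List.map_cons, List.idxOf_cons_ne _ (by exact hac), List.set_cons_succ,
        if_neg hac]
      rw [ih (List.nodup_cons.mp hnd).2 hct]

theorem pv_step_map (f : Char → Int) (c : Char) :
    pvStepA (pvTags.toList.map f) c =
      pvTags.toList.map (fun t => if t = c then f t + 1 else f t) := by
  by_cases hc : c ∈ pvTags.toList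
  · have hlt : pvTags.toList.idxOf c < pvTags.toList.length := List.idxOf_lt_length_of_mem hc
    unfold pvStepA
    rw [pv_find_single, if_pos hc, if_pos (by omega)]
    rw [PySem.List.pySetD_natCast, PySem.List.pyGetD_natCast]
    have hget : (pvTags.toList.map f).getD (pvTags.toList.idxOf c) 0 = f c := by
      rw [List.getD_eq_getElem _ _ (by simpa using hlt)]
      simp [List.getElem_map, List.getElem_idxOf hlt]
    rw [hget]
    exact pv_set_idxOf _ (by decide) _ hc _
  · unfold pvStepA
    rw [pv_find_single, if_neg hc]
    simp only [show ¬((-1 : Int) > -1) by decide, if_false]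
    exact (List.map_congr_left (fun t ht => by
      have : t ≠ c := fun h => hc (h ▸ ht)
      simp [this])).symm

theorem pv_loop (cs : List Char) (f : Char → Int) :
    cs.foldl pvStepA (pvTags.toList.map f) =
      pvTags.toList.map (fun t => f t + (cs.count t : Int)) := by
  induction cs generalizing f with
  | nil => simp
  | cons c cs ih =>
    rw [List.foldl_cons, pv_step_map, ih]
    exact List.map_congr_left (fun t _ => by
      by_cases h : t = c
      · simp [h]
        ring
      · simp [List.count_cons, h]
        exact fun hh => h hh.symm)

-- ===== VERDICT (by name: the statement is the Claim_ definition above) =====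
theorem get_pos_encoding_spec : Claim_equal_get_pos_encoding := by
  intro POS_tags _
  unfold Spec_get_pos_encoding get_pos_encoding get_pos_encoding_alt
  rw [PySem.List.foldl_append_singleton_eq_map]
  have := PySem.List.map_snd_enumerate (xs := POS_tags) (s := 0)
  calc (PySem.List.enumerate POS_tags).map
        (fun ct => ct.2.toList.foldl pvStepA (pvTags.toList.map (fun _ => (0 : Int))))
      = ((PySem.List.enumerate POS_tags).map (·.2)).map
        (fun tw => tw.toList.foldl pvStepA (pvTags.toList.map (fun _ => (0 : Int)))) := by
        rw [List.map_map]; rfl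
    _ = POS_tags.map (fun tw => tw.toList.foldl pvStepA (pvTags.toList.map (fun _ => (0 : Int)))) := by
        rw [this]
    _ = POS_tags.map (fun tweet => pvTags.toList.map (fun t => (PySem.List.count tweet.toList t : Int))) := by
        exact List.map_congr_left (fun tw _ => by
          rw [pv_loop]
          exact List.map_congr_left (fun t _ => by simp [PySem.List.count_eq]))
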